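-- pv_equiv track=rewrite | github.com/biostochastics/CodeConCat | codeconcat/parser/language_parsers/tree_sitter_js_ts_parser.py | _clean_jsdoc
-- ===== SOURCE A (Python) =====
-- def _clean_jsdoc(comment_text: str) -> str:
--     """Cleans a JSDoc block comment, removing delimiters and leading asterisks."""
--     lines = comment_text.split("\n")
--     cleaned_lines = []
--     in_tag = False
--     current_tag = ""
--     current_tag_content = []
--
--     for i, line in enumerate(lines):
--         stripped = line.strip()
--
--         # Handle first and last lines specifically
--         if i == 0 and stripped.startswith("/**"):
--             # Remove '/**'
--             cleaned = stripped[3:].strip()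
--         elif i == len(lines) - 1 and stripped.endswith("*/"):
--             # Remove '*/'
--             cleaned = stripped[:-2].strip()
--             if cleaned.startswith("*"):
--                 cleaned = cleaned[1:].strip()
--         elif stripped.startswith("*"):
--             # Remove leading '* '
--             cleaned = stripped[1:].strip()
--         else:
--             cleaned = stripped
--
--         # Process JSDoc tags (@param, @returns, @type, etc.)
--         if cleaned and cleaned.startswith("@"):
--             # If we were processing a previous tag, add it to the output
--             if in_tag and current_tag_content:
--                 tag_text = "\n".join(current_tag_content).strip()
--                 if tag_text:
--                     cleaned_lines.append(f"{current_tag}: {tag_text}")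
--
--             # Start a new tag
--             parts = cleaned.split(" ", 1)
--             current_tag = parts[0]  # The tag itself (@param, @returns, etc)
--
--             # If there's content on the same line as the tag
--             if len(parts) > 1 and parts[1].strip():
--                 # For @param tags, extract the parameter name
--                 if current_tag == "@param" and "{" not in parts[1]:
--                     param_parts = parts[1].split(" ", 1)
--                     param_name = param_parts[0]
--                     param_desc = param_parts[1] if len(param_parts) > 1 else ""
--                     current_tag_content = [
--                         f"{param_name} - {param_desc}" if param_desc else param_name
--                     ]
--                 else:
--                     current_tag_content = [parts[1].strip()]
--             else:
--                 current_tag_content = []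
--             in_tag = True
--         elif in_tag:
--             # Continue with the current tag
--             if cleaned:
--                 current_tag_content.append(cleaned)
--         elif cleaned:
--             # Regular line (not part of a tag)
--             cleaned_lines.append(cleaned)
--
--     # Don't forget the last tag if there was one
--     if in_tag and current_tag_content:
--         tag_text = "\n".join(current_tag_content).strip()
--         if tag_text:
--             cleaned_lines.append(f"{current_tag}: {tag_text}")
--
--     return "\n".join(cleaned_lines)
-- ===== SOURCE B (Python) =====
-- def _clean_line(line, is_first, is_last):
--     stripped = line.strip()
--     if is_first and stripped.startswith("/**"):
--         return stripped[3:].strip()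
--     if is_last and stripped.endswith("*/"):
--         cleaned = stripped[:-2].strip()
--         if cleaned.startswith("*"):
--             cleaned = cleaned[1:].strip()
--         return cleaned
--     if stripped.startswith("*"):
--         return stripped[1:].strip()
--     return stripped
--
--
-- def _find_tag(cs):
--     return next((i for i, c in enumerate(cs) if c.startswith("@")), len(cs))
--
--
-- def _head_content(head):
--     parts = head.split(" ", 1)
--     if len(parts) > 1 and parts[1].strip():
--         if parts[0] == "@param" and "{" not in parts[1]:
--             param_parts = parts[1].split(" ", 1)
--             name = param_parts[0]
--             desc = param_parts[1] if len(param_parts) > 1 else ""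
--             return [f"{name} - {desc}" if desc else name]
--         return [parts[1].strip()]
--     return []
--
--
-- def _render_block(head, cont):
--     tag = head.split(" ", 1)[0]
--     text = "\n".join(_head_content(head) + cont).strip()
--     return f"{tag}: {text}" if text else None
--
--
-- def _clean_jsdoc(comment_text: str) -> str:
--     lines = comment_text.split("\n")
--     n = len(lines)
--     cleaned = [_clean_line(line, i == 0, i == n - 1) for i, line in enumerate(lines)]
--     first = _find_tag(cleaned)
--     out = [c for c in cleaned[:first] if c]
--     rest = cleaned[first:]
--     while rest:
--         head, tail = rest[0], rest[1:]
--         k = _find_tag(tail)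
--         entry = _render_block(head, [c for c in tail[:k] if c])
--         if entry is not None:
--             out.append(entry)
--         rest = tail[k:]
--     return "\n".join(out)
-- ===== Notes on version B (the rewrite author's own statement) =====
-- stated objective: alternative
-- what changed: A's single fused loop with a four-part mutable state machine (in_tag flag, current tag, accumulated content) is replaced by three separate passes: clean every line by index, split the cleaned list at the first tag line, then render each tag block by slicing off its continuation lines up to the next tag.
import Mathlib
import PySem

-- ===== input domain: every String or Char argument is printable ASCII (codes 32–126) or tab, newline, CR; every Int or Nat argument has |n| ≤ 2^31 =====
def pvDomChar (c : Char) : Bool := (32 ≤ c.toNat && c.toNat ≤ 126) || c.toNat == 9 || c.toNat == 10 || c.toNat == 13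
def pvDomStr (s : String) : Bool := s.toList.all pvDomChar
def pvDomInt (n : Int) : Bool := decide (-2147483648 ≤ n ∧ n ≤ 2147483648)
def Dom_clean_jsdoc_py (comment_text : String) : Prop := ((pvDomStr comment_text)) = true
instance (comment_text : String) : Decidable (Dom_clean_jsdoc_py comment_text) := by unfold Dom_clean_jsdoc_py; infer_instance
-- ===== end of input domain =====

-- B re-decomposes A's fused state machine into three passes (clean every line, split at the
-- first tag line, then render each tag block by slicing) — objective: alternative decomposition, same cost.

-- ===== PORT A =====
-- Literal transliteration of _clean_jsdoc: one fold over enumerate(lines) carrying the state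
-- (cleaned_lines, in_tag, current_tag, current_tag_content), cleaning and tag-processing fused.
-- (parts.getD 0 [] ports Python's parts[0]: split always returns a nonempty list, the index is in range.)
def clean_jsdoc_py (comment_text : String) : String :=
  let lines := PySem.Chars.splitOn comment_text.toList ['\n']
  let n := lines.length
  let fin := (PySem.List.enumerate lines 0).foldl
    (fun (st : List (List Char) × Bool × List Char × List (List Char)) (p : Int × List Char) =>
      let (cleanedLines, inTag, curTag, curContent) := st
      let stripped := PySem.Chars.strip p.2
      let cleaned :=
        if p.1 == 0 && PySem.Chars.startswith stripped ['/', '*', '*'] then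
          PySem.Chars.strip (PySem.List.slice stripped (some 3) none)
        else if p.1 == (n : Int) - 1 && PySem.Chars.endswith stripped ['*', '/'] then
          let c := PySem.Chars.strip (PySem.List.slice stripped none (some (-2)))
          if PySem.Chars.startswith c ['*'] then PySem.Chars.strip (PySem.List.slice c (some 1) none)
          else c
        else if PySem.Chars.startswith stripped ['*'] then
          PySem.Chars.strip (PySem.List.slice stripped (some 1) none)
        else stripped
      if !cleaned.isEmpty && PySem.Chars.startswith cleaned ['@'] then
        let cleanedLines :=
          if inTag && !curContent.isEmpty then
            let tagText := PySem.Chars.strip (PySem.Chars.join ['\n'] curContent)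
            if !tagText.isEmpty then cleanedLines ++ [curTag ++ [':', ' '] ++ tagText]
            else cleanedLines
          else cleanedLines
        let parts := PySem.Chars.splitOnMax cleaned [' '] 1
        let curTag := parts.getD 0 []
        let curContent :=
          if parts.length > 1 && !(PySem.Chars.strip (parts.getD 1 [])).isEmpty then
            if curTag == ['@', 'p', 'a', 'r', 'a', 'm'] && !PySem.Chars.isIn ['{'] (parts.getD 1 []) then
              let paramParts := PySem.Chars.splitOnMax (parts.getD 1 []) [' '] 1
              let paramName := paramParts.getD 0 []
              let paramDesc := if paramParts.length > 1 then paramParts.getD 1 [] else []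
              [if !paramDesc.isEmpty then paramName ++ [' ', '-', ' '] ++ paramDesc else paramName]
            else [PySem.Chars.strip (parts.getD 1 [])]
          else []
        (cleanedLines, true, curTag, curContent)
      else if inTag then
        (cleanedLines, inTag, curTag, if !cleaned.isEmpty then curContent ++ [cleaned] else curContent)
      else
        (if !cleaned.isEmpty then cleanedLines ++ [cleaned] else cleanedLines, inTag, curTag, curContent))
    ([], false, [], [])
  let (cleanedLines, inTag, curTag, curContent) := fin
  let cleanedLines :=
    if inTag && !curContent.isEmpty then
      let tagText := PySem.Chars.strip (PySem.Chars.join ['\n'] curContent)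
      if !tagText.isEmpty then cleanedLines ++ [curTag ++ [':', ' '] ++ tagText] else cleanedLines
    else cleanedLines
  String.ofList (PySem.Chars.join ['\n'] cleanedLines)

-- ===== PORT B =====
-- B-side helpers (transliterations of Source B's _clean_line, _find_tag, _head_content, _render_block).
def jsCleanLine (isFirst isLast : Bool) (line : List Char) : List Char :=
  let stripped := PySem.Chars.strip line
  if isFirst && PySem.Chars.startswith stripped ['/', '*', '*'] then
    PySem.Chars.strip (PySem.List.slice stripped (some 3) none)
  else if isLast && PySem.Chars.endswith stripped ['*', '/'] then
    let c := PySem.Chars.strip (PySem.List.slice stripped none (some (-2)))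
    if PySem.Chars.startswith c ['*'] then PySem.Chars.strip (PySem.List.slice c (some 1) none)
    else c
  else if PySem.Chars.startswith stripped ['*'] then
    PySem.Chars.strip (PySem.List.slice stripped (some 1) none)
  else stripped

def jsIsTag (c : List Char) : Bool := PySem.Chars.startswith c ['@']

def jsHeadContent (head : List Char) : List (List Char) :=
  let parts := PySem.Chars.splitOnMax head [' '] 1
  if parts.length > 1 && !(PySem.Chars.strip (parts.getD 1 [])).isEmpty then
    if parts.getD 0 [] == ['@', 'p', 'a', 'r', 'a', 'm'] && !PySem.Chars.isIn ['{'] (parts.getD 1 []) then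
      let paramParts := PySem.Chars.splitOnMax (parts.getD 1 []) [' '] 1
      let paramName := paramParts.getD 0 []
      let paramDesc := if paramParts.length > 1 then paramParts.getD 1 [] else []
      [if !paramDesc.isEmpty then paramName ++ [' ', '-', ' '] ++ paramDesc else paramName]
    else [PySem.Chars.strip (parts.getD 1 [])]
  else []

def jsRenderBlock (head : List Char) (cont : List (List Char)) : Option (List Char) :=
  let tag := (PySem.Chars.splitOnMax head [' '] 1).getD 0 []
  let text := PySem.Chars.strip (PySem.Chars.join ['\n'] (jsHeadContent head ++ cont))
  if !text.isEmpty then some (tag ++ [':', ' '] ++ text) else none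

-- Source B's while-loop over `rest`: pop the head tag line, slice off its continuation lines, recurse.
def jsBlocks : List (List Char) → List (List Char)
  | [] => []
  | head :: tail =>
    let k := tail.findIdx jsIsTag
    (match jsRenderBlock head ((tail.take k).filter (fun c => !c.isEmpty)) with
      | some e => [e]
      | none => []) ++ jsBlocks (tail.drop k)
  termination_by l => l.length
  decreasing_by simp

def clean_jsdoc_py_alt (comment_text : String) : String :=
  let lines := PySem.Chars.splitOn comment_text.toList ['\n']
  let n := lines.length
  let cleaned := (PySem.List.enumerate lines 0).map
    (fun p => jsCleanLine (p.1 == 0) (p.1 == (n : Int) - 1) p.2)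
  let first := cleaned.findIdx jsIsTag
  let out := (cleaned.take first).filter (fun c => !c.isEmpty)
  String.ofList (PySem.Chars.join ['\n'] (out ++ jsBlocks (cleaned.drop first)))

-- ===== PRECONDITION & SPEC =====
def Spec_clean_jsdoc_py (comment_text : String) (out : String) : Prop := out = clean_jsdoc_py_alt comment_text
instance (comment_text : String) (out : String) : Decidable (Spec_clean_jsdoc_py comment_text out) := by unfold Spec_clean_jsdoc_py; infer_instance

-- ===== CLAIM (what is proved, stated in full; the proofs are below) =====
def Claim_equal_clean_jsdoc_py : Prop := ∀ (comment_text : String), Dom_clean_jsdoc_py comment_text → Spec_clean_jsdoc_py comment_text (clean_jsdoc_py comment_text)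

-- ===== LEMMAS AND PROOFS =====

-- A's state and its tag-processing step, on an already-cleaned line (the processing half of A's fused loop body).
def aState : Type := List (List Char) × Bool × List Char × List (List Char)

def aFlush (cleanedLines : List (List Char)) (inTag : Bool) (curTag : List Char)
    (curContent : List (List Char)) : List (List Char) :=
  if inTag && !curContent.isEmpty then
    let tagText := PySem.Chars.strip (PySem.Chars.join ['\n'] curContent)
    if !tagText.isEmpty then cleanedLines ++ [curTag ++ [':', ' '] ++ tagText] else cleanedLines
  else cleanedLines

def aStep (st : aState) (cleaned : List Char) : aState :=
  let (cleanedLines, inTag, curTag, curContent) := st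
  if !cleaned.isEmpty && PySem.Chars.startswith cleaned ['@'] then
    let cleanedLines := aFlush cleanedLines inTag curTag curContent
    let parts := PySem.Chars.splitOnMax cleaned [' '] 1
    let curTag := parts.getD 0 []
    let curContent :=
      if parts.length > 1 && !(PySem.Chars.strip (parts.getD 1 [])).isEmpty then
        if curTag == ['@', 'p', 'a', 'r', 'a', 'm'] && !PySem.Chars.isIn ['{'] (parts.getD 1 []) then
          let paramParts := PySem.Chars.splitOnMax (parts.getD 1 []) [' '] 1
          let paramName := paramParts.getD 0 []
          let paramDesc := if paramParts.length > 1 then paramParts.getD 1 [] else []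
          [if !paramDesc.isEmpty then paramName ++ [' ', '-', ' '] ++ paramDesc else paramName]
        else [PySem.Chars.strip (parts.getD 1 [])]
      else []
    (cleanedLines, true, curTag, curContent)
  else if inTag then
    (cleanedLines, inTag, curTag, if !cleaned.isEmpty then curContent ++ [cleaned] else curContent)
  else
    (if !cleaned.isEmpty then cleanedLines ++ [cleaned] else cleanedLines, inTag, curTag, curContent)

def aFinal (st : aState) : List (List Char) :=
  aFlush st.1 st.2.1 st.2.2.1 st.2.2.2

def jsTagOf (head : List Char) : List Char := (PySem.Chars.splitOnMax head [' '] 1).getD 0 []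

def emitE (tag : List Char) (content : List (List Char)) : List (List Char) :=
  let t := PySem.Chars.strip (PySem.Chars.join ['\n'] content)
  if !t.isEmpty then [tag ++ [':', ' '] ++ t] else []

lemma tag_cond (c : List Char) : (!c.isEmpty && PySem.Chars.startswith c ['@']) = jsIsTag c := by
  cases c <;> simp [jsIsTag, PySem.Chars.startswith]

lemma jsBlocks_nil : jsBlocks [] = [] := by
  rw [jsBlocks.eq_def]

lemma jsBlocks_cons (head : List Char) (tail : List (List Char)) :
    jsBlocks (head :: tail) =
      (match jsRenderBlock head ((tail.take (tail.findIdx jsIsTag)).filter (fun c => !c.isEmpty)) with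
        | some e => [e]
        | none => []) ++ jsBlocks (tail.drop (tail.findIdx jsIsTag)) := by
  rw [jsBlocks.eq_def]

lemma flush_true (acc : List (List Char)) (tag : List Char) (content : List (List Char)) :
    aFlush acc true tag content = acc ++ emitE tag content := by
  cases content with
  | nil =>
    simp [aFlush, emitE, show PySem.Chars.strip ([] : List Char) = [] from rfl]
  | cons c cs =>
    simp only [aFlush, emitE, List.isEmpty_cons, Bool.not_false, Bool.and_true]
    by_cases ht : PySem.Chars.strip (PySem.Chars.join ['\n'] (c :: cs)) = [] <;> simp [ht]

lemma render_eq (head : List Char) (cont : List (List Char)) :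
    (match jsRenderBlock head cont with
      | some e => [e]
      | none => ([] : List (List Char))) = emitE (jsTagOf head) (jsHeadContent head ++ cont) := by
  simp only [jsRenderBlock, jsTagOf, emitE]
  split <;> rename_i h <;> simp_all

lemma aStep_tag (st : aState) (c : List Char) (h : jsIsTag c = true) :
    aStep st c = (aFlush st.1 st.2.1 st.2.2.1 st.2.2.2, true, jsTagOf c, jsHeadContent c) := by
  obtain ⟨a, b, t, d⟩ := st
  simp only [aStep, tag_cond, h, if_pos, jsTagOf, jsHeadContent]

lemma aStep_notag (st : aState) (c : List Char) (h : jsIsTag c = false) :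
    aStep st c =
      if st.2.1 then (st.1, st.2.1, st.2.2.1, if !c.isEmpty then st.2.2.2 ++ [c] else st.2.2.2)
      else (if !c.isEmpty then st.1 ++ [c] else st.1, st.2.1, st.2.2.1, st.2.2.2) := by
  obtain ⟨a, b, t, d⟩ := st
  simp only [aStep, tag_cond, h]
  cases b <;> simp

-- The in-tag invariant: from state (acc, true, tag, content), A's remaining loop produces
-- exactly the current block (content extended by the continuation lines up to the next tag)
-- followed by B's remaining blocks.
lemma L2 (cs : List (List Char)) (acc : List (List Char)) (tag : List Char)
    (content : List (List Char)) :
    aFinal (cs.foldl aStep (acc, true, tag, content)) =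
      acc ++ emitE tag (content ++ (cs.take (cs.findIdx jsIsTag)).filter (fun c => !c.isEmpty))
        ++ jsBlocks (cs.drop (cs.findIdx jsIsTag)) := by
  induction cs generalizing acc tag content with
  | nil => simp [aFinal, flush_true, jsBlocks_nil]
  | cons c cs ih =>
    cases h : jsIsTag c with
    | true =>
      rw [List.foldl_cons, aStep_tag _ _ h]
      rw [ih]
      simp only [flush_true]
      rw [List.findIdx_cons, h]
      simp only [cond_true, List.take_zero, List.filter_nil, List.append_nil, List.drop_zero]
      rw [jsBlocks_cons, render_eq]
      simp [List.append_assoc]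
    | false =>
      rw [List.foldl_cons, aStep_notag _ _ h]
      simp only [if_pos]
      rw [List.findIdx_cons, h]
      by_cases hc : c.isEmpty
      · rw [ih]
        simp [hc, cond_false]
      · rw [ih]
        simp only [cond_false, List.take_succ_cons, List.drop_succ_cons, List.filter_cons, hc,
          Bool.not_false, if_pos, List.append_assoc]
        simp

-- The before-any-tag invariant: from state (acc, false, tag, []), A's remaining loop keeps the
-- nonempty cleaned lines up to the first tag, then hands over to the in-tag invariant.
lemma L1 (cs : List (List Char)) (acc : List (List Char)) (tag : List Char) :
    aFinal (cs.foldl aStep (acc, false, tag, [])) =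
      acc ++ (cs.take (cs.findIdx jsIsTag)).filter (fun c => !c.isEmpty)
        ++ jsBlocks (cs.drop (cs.findIdx jsIsTag)) := by
  induction cs generalizing acc tag with
  | nil => simp [aFinal, aFlush, jsBlocks_nil]
  | cons c cs ih =>
    cases h : jsIsTag c with
    | true =>
      rw [List.foldl_cons, aStep_tag _ _ h]
      rw [L2]
      simp only [aFlush, Bool.false_and]
      rw [List.findIdx_cons, h]
      simp only [cond_true, List.take_zero, List.filter_nil, List.append_nil, List.drop_zero]
      rw [jsBlocks_cons, render_eq]
      simp [List.append_assoc]
    | false =>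
      rw [List.foldl_cons, aStep_notag _ _ h]
      simp only [if_neg, Bool.false_eq_true, not_false_iff]
      rw [List.findIdx_cons, h]
      by_cases hc : c.isEmpty
      · rw [ih]
        simp [hc]
      · rw [ih]
        simp only [cond_false, List.take_succ_cons, List.drop_succ_cons, List.filter_cons, hc,
          Bool.not_false, if_pos]
        simp [List.append_assoc]

-- A's fused fold is the processing fold over the cleaned (mapped) list.
lemma A_eq (s : String) :
    clean_jsdoc_py s = String.ofList (PySem.Chars.join ['\n']
      (aFinal (((PySem.List.enumerate (PySem.Chars.splitOn s.toList ['\n']) 0).map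
        (fun p => jsCleanLine (p.1 == 0)
          (p.1 == ((PySem.Chars.splitOn s.toList ['\n']).length : Int) - 1) p.2)).foldl
        aStep ([], false, [], [])))) := by
  unfold clean_jsdoc_py
  rw [List.foldl_map]
  rfl

-- ===== VERDICT (by name: the statement is the Claim_ definition above) =====
theorem clean_jsdoc_py_spec : Claim_equal_clean_jsdoc_py := by
  intro s _
  unfold Spec_clean_jsdoc_py
  rw [A_eq, clean_jsdoc_py_alt]
  rw [L1]
  rfl
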